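-- pv_equiv track=rewrite | github.com/MarcusJellinghaus/mcp_server_filesystem | tests/file_tools/test_tree_listing.py | _make_paths
-- ===== SOURCE A (Python) =====
-- from typing import List
--
-- def _make_paths(
--     dirs: List[str], files_per_dir: int, depth: int = 1
-- ) -> List[str]:
--     """Generate file paths for testing large trees.
--
--     Creates `files_per_dir` files in each directory at each nesting level
--     up to `depth`.
--     """
--     paths: List[str] = []
--     for d in dirs:
--         for level in range(depth):
--             if level == 0:
--                 prefix = d
--             else:
--                 prefix = d + "/" + "/".join(f"sub{i}" for i in range(level))
--             for i in range(files_per_dir):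
--                 paths.append(f"{prefix}/file{i}.py")
--     return paths
-- ===== SOURCE B (Python) =====
-- from typing import List
--
-- def _make_paths(
--     dirs: List[str], files_per_dir: int, depth: int = 1
-- ) -> List[str]:
--     """Generate file paths for testing large trees (incremental-prefix version)."""
--     paths: List[str] = []
--     for d in dirs:
--         prefix = d
--         for level in range(depth):
--             for i in range(files_per_dir):
--                 paths.append(f"{prefix}/file{i}.py")
--             prefix += f"/sub{level}"
--     return paths
-- ===== Notes on version B (the rewrite author's own statement) =====
-- stated objective: alternative
-- what changed: B threads an incremental prefix accumulator through the level loop (appending /sub{level} after each level) instead of recomputing the prefix at every level with '/'.join over range(level).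
import Mathlib
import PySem

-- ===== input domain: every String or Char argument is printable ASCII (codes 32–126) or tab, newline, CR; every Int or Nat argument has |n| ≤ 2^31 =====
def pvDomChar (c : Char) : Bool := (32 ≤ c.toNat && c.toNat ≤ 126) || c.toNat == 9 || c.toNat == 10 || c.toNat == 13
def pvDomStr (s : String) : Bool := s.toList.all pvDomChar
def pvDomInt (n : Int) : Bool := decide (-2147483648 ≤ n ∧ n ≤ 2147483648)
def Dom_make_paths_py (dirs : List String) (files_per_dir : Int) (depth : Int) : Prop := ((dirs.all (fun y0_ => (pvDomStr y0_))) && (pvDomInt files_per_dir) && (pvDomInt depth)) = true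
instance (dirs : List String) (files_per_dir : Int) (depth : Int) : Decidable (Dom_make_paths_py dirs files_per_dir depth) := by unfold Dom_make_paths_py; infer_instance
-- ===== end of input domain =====

-- B threads an incremental prefix accumulator through the level loop instead of recomputing
-- A's per-level '/'.join prefix from scratch (alternative decomposition).

-- ===== PORT A =====
-- A's per-level prefix: d for level 0, else d + "/" + "/".join(f"sub{i}" for i in range(level))
def pvPrefixA (d : String) (level : Int) : String :=
  if level == 0 then d
  else d ++ "/" ++ PySem.Str.join "/" ((PySem.List.pyRange 0 level 1).map (fun i => "sub" ++ PySem.Int.toStr i))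

def make_paths_py (dirs : List String) (files_per_dir : Int) (depth : Int) : List String :=
  dirs.foldl (fun paths d =>
    (PySem.List.pyRange 0 depth 1).foldl (fun paths level =>
      (PySem.List.pyRange 0 files_per_dir 1).foldl (fun paths i =>
        paths ++ [pvPrefixA d level ++ "/file" ++ PySem.Int.toStr i ++ ".py"]) paths) paths) []

-- ===== PORT B =====
def make_paths_py_alt (dirs : List String) (files_per_dir : Int) (depth : Int) : List String :=
  dirs.foldl (fun paths d =>
    ((PySem.List.pyRange 0 depth 1).foldl (fun (st : String × List String) level =>
      (st.1 ++ "/sub" ++ PySem.Int.toStr level,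
       (PySem.List.pyRange 0 files_per_dir 1).foldl (fun ps i =>
         ps ++ [st.1 ++ "/file" ++ PySem.Int.toStr i ++ ".py"]) st.2)) (d, paths)).2) []

-- ===== PRECONDITION & SPEC =====
def Spec_make_paths_py (dirs : List String) (files_per_dir : Int) (depth : Int) (out : List String) : Prop := out = make_paths_py_alt dirs files_per_dir depth
instance (dirs : List String) (files_per_dir : Int) (depth : Int) (out : List String) : Decidable (Spec_make_paths_py dirs files_per_dir depth out) := by unfold Spec_make_paths_py; infer_instance

-- ===== CLAIM (what is proved, stated in full; the proofs are below) =====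
def Claim_equal_make_paths_py : Prop := ∀ (dirs : List String) (files_per_dir : Int) (depth : Int), Dom_make_paths_py dirs files_per_dir depth → Spec_make_paths_py dirs files_per_dir depth (make_paths_py dirs files_per_dir depth)

-- ===== LEMMAS AND PROOFS =====

-- appending one part to a nonempty join inserts one separator
theorem pvJoinAux (sep x y : List Char) (l : List (List Char)) :
    PySem.Chars.join sep (y :: (l ++ [x])) = PySem.Chars.join sep (y :: l) ++ sep ++ x := by
  induction l generalizing y with
  | nil => simp [PySem.Chars.join_cons_cons, PySem.Chars.join_singleton]
  | cons z l ih =>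
    rw [List.cons_append, PySem.Chars.join_cons_cons, ih z, PySem.Chars.join_cons_cons]
    simp [List.append_assoc]

theorem pvJoinAuxS (sep x y : String) (l : List String) :
    PySem.Str.join sep (y :: (l ++ [x])) = PySem.Str.join sep (y :: l) ++ sep ++ x := by
  rw [← String.toList_inj]
  simp only [PySem.Str.toList_join, String.toList_append, List.map_cons, List.map_append,
    List.map_nil]
  exact pvJoinAux sep.toList x.toList y.toList (l.map String.toList)

-- A's joined prefix obeys B's incremental recurrence
theorem pvPrefixA_succ (d : String) (n : Nat) :
    pvPrefixA d ((n : Int) + 1) = pvPrefixA d (n : Int) ++ "/sub" ++ PySem.Int.toStr (n : Int) := by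
  cases n with
  | zero =>
    have hr : PySem.List.pyRange 0 1 1 = [0] := by decide
    have h0 : PySem.Int.toStr 0 = "0" := by decide
    rw [← String.toList_inj]
    simp [pvPrefixA, hr, h0, PySem.Str.toList_join, PySem.Chars.join_singleton]
  | succ m =>
    have hm : (0:Int) ≤ (m:Int) + 1 := by positivity
    have hr : PySem.List.pyRange 0 (((m:Int)+1)+1) 1
        = PySem.List.pyRange 0 ((m:Int)+1) 1 ++ [(m:Int)+1] :=
      PySem.List.pyRange_one_succ_right hm
    have hc : PySem.List.pyRange 0 ((m:Int)+1) 1 = 0 :: PySem.List.pyRange 1 ((m:Int)+1) 1 :=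
      PySem.List.pyRange_one_cons (by positivity)
    have hne1 : ¬ ((((m:Nat):Int)+1)+1 == 0) = true := by simp; omega
    have hne2 : ¬ ((((m:Nat):Int)+1) == 0) = true := by simp; omega
    simp only [Nat.cast_succ, pvPrefixA, hne1, hne2, hr, List.map_append, hc, List.map_cons,
      List.map_nil, Bool.false_eq_true, if_false]
    rw [List.cons_append, pvJoinAuxS "/" ("sub" ++ PySem.Int.toStr ((m:Int)+1)) ("sub" ++ PySem.Int.toStr 0) ((PySem.List.pyRange 1 ((m:Int)+1) 1).map (fun i => "sub" ++ PySem.Int.toStr i))]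
    rw [← String.toList_inj]
    simp [String.toList_append, List.append_assoc]

-- the per-dir level loop: B's threaded state is (pvPrefixA d n, A's paths so far)
theorem pvDirLoop (d : String) (fpd : Int) (n : Nat) (paths : List String) :
    (PySem.List.pyRange 0 (n:Int) 1).foldl (fun (st : String × List String) level =>
        (st.1 ++ "/sub" ++ PySem.Int.toStr level,
         (PySem.List.pyRange 0 fpd 1).foldl (fun ps i =>
           ps ++ [st.1 ++ "/file" ++ PySem.Int.toStr i ++ ".py"]) st.2))
      (d, paths)
    = (pvPrefixA d (n:Int),
       (PySem.List.pyRange 0 (n:Int) 1).foldl (fun paths level =>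
         (PySem.List.pyRange 0 fpd 1).foldl (fun paths i =>
           paths ++ [pvPrefixA d level ++ "/file" ++ PySem.Int.toStr i ++ ".py"]) paths) paths) := by
  induction n with
  | zero =>
    have h0 : PySem.List.pyRange 0 0 1 = [] := by decide
    simp [h0, pvPrefixA]
  | succ n ih =>
    have hr : PySem.List.pyRange 0 ((n:Int)+1) 1
        = PySem.List.pyRange 0 (n:Int) 1 ++ [(n:Int)] :=
      PySem.List.pyRange_one_succ_right (by positivity)
    rw [Nat.cast_succ, hr, List.foldl_append, List.foldl_append, ih]
    refine Prod.ext ?_ ?_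
    · simpa using (pvPrefixA_succ d n).symm
    · simp only [List.foldl_cons, List.foldl_nil]

theorem pvRangeToNat (depth : Int) :
    PySem.List.pyRange 0 depth 1 = PySem.List.pyRange 0 (depth.toNat : Int) 1 := by
  by_cases h : depth ≤ 0
  · rw [PySem.List.pyRange_one_eq_nil h,
      PySem.List.pyRange_one_eq_nil (by simp [Int.toNat_of_nonpos h])]
  · rw [Int.toNat_of_nonneg (by omega)]

theorem pvDirEq (d : String) (fpd depth : Int) (paths : List String) :
    ((PySem.List.pyRange 0 depth 1).foldl (fun (st : String × List String) level =>
        (st.1 ++ "/sub" ++ PySem.Int.toStr level,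
         (PySem.List.pyRange 0 fpd 1).foldl (fun ps i =>
           ps ++ [st.1 ++ "/file" ++ PySem.Int.toStr i ++ ".py"]) st.2))
      (d, paths)).2
    = (PySem.List.pyRange 0 depth 1).foldl (fun paths level =>
        (PySem.List.pyRange 0 fpd 1).foldl (fun paths i =>
          paths ++ [pvPrefixA d level ++ "/file" ++ PySem.Int.toStr i ++ ".py"]) paths) paths := by
  rw [pvRangeToNat depth, pvDirLoop]

theorem pvMain (ds : List String) (fpd depth : Int) (paths : List String) :
    ds.foldl (fun paths d =>
      (PySem.List.pyRange 0 depth 1).foldl (fun paths level =>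
        (PySem.List.pyRange 0 fpd 1).foldl (fun paths i =>
          paths ++ [pvPrefixA d level ++ "/file" ++ PySem.Int.toStr i ++ ".py"]) paths) paths) paths
    = ds.foldl (fun paths d =>
        ((PySem.List.pyRange 0 depth 1).foldl (fun (st : String × List String) level =>
          (st.1 ++ "/sub" ++ PySem.Int.toStr level,
           (PySem.List.pyRange 0 fpd 1).foldl (fun ps i =>
           ps ++ [st.1 ++ "/file" ++ PySem.Int.toStr i ++ ".py"]) st.2))
          (d, paths)).2) paths := by
  induction ds generalizing paths with
  | nil => rfl
  | cons d ds ih =>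
    simp only [List.foldl_cons]
    rw [pvDirEq]
    exact ih _

-- ===== VERDICT (by name: the statement is the Claim_ definition above) =====
theorem make_paths_py_spec : Claim_equal_make_paths_py := by
  intro dirs fpd depth _
  unfold Spec_make_paths_py make_paths_py make_paths_py_alt
  exact pvMain dirs fpd depth []
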